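-- pv_equiv track=rewrite | github.com/seba1288/pp1 | 04-Subroutines/task/task44.py | f
-- ===== SOURCE A (Python) =====
-- def f(password):
--     list1 = []
--     for letter in password:
--         if letter not in list1:
--             list1.append(letter)
--     count = len(list1)
--     if count >= 6:
--         return True
--     else:
--         return False
-- ===== SOURCE B (Python) =====
-- def f(password):
--     count = 0
--     prev = None
--     for c in sorted(password):
--         if prev is None or c != prev:
--             count += 1
--         prev = c
--     return count >= 6
-- ===== Notes on version B (the rewrite author's own statement) =====
-- stated objective: alternative
-- what changed: replaces A's membership-scan accumulation of first occurrences with a sort-then-single-pass adjacent-difference count of distinct characters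
import Mathlib
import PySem

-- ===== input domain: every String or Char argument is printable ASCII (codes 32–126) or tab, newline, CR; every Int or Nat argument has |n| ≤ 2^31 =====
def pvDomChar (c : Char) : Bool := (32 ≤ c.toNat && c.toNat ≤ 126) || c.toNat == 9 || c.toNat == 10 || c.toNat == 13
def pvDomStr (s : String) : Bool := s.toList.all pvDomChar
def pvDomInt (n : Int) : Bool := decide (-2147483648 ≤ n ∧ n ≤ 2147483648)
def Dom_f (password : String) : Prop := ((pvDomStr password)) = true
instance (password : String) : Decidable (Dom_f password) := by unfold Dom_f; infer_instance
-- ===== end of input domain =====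

-- B replaces A's membership-scan accumulation with a sort-then-adjacent-compare distinct count (alternative decomposition, no speed claim).

-- ===== PORT A =====
def f (password : String) : Bool :=
  let list1 := password.toList.foldl
    (fun acc letter => if letter ∈ acc then acc else acc ++ [letter]) []
  let count := list1.length
  if count ≥ 6 then true else false

-- ===== PORT B =====
def f_alt (password : String) : Bool :=
  let chars := PySem.List.sorted password.toList (fun x => x) false
  let st := chars.foldl
    (fun (st : Nat × Option Char) c =>
      (if st.2 = some c then st.1 else st.1 + 1, some c)) (0, none)
  decide (st.1 ≥ 6)

-- ===== PRECONDITION & SPEC =====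
def Spec_f (password : String) (out : Bool) : Prop := out = f_alt password
instance (password : String) (out : Bool) : Decidable (Spec_f password out) := by unfold Spec_f; infer_instance

-- ===== CLAIM (what is proved, stated in full; the proofs are below) =====
def Claim_equal_f : Prop := ∀ (password : String), Dom_f password → Spec_f password (f password)

-- ===== LEMMAS AND PROOFS =====

-- A's accumulator: nodup, and membership is acc ∪ input
theorem pvA_inv (l : List Char) : ∀ acc : List Char, acc.Nodup →
    (l.foldl (fun acc letter => if letter ∈ acc then acc else acc ++ [letter]) acc).Nodup ∧
    ∀ x, x ∈ l.foldl (fun acc letter => if letter ∈ acc then acc else acc ++ [letter]) acc ↔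
      x ∈ acc ∨ x ∈ l := by
  induction l with
  | nil => intro acc h; simpa using h
  | cons c t ih =>
    intro acc h
    simp only [List.foldl_cons]
    by_cases hc : c ∈ acc
    · simp only [if_pos hc]
      obtain ⟨h1, h2⟩ := ih acc h
      refine ⟨h1, fun x => ?_⟩
      rw [h2]
      simp only [List.mem_cons]
      constructor
      · tauto
      · rintro (hx | hx | hx)
        · exact Or.inl hx
        · exact Or.inl (hx ▸ hc)
        · exact Or.inr hx
    · simp only [if_neg hc]
      have hnd : (acc ++ [c]).Nodup := by
        rw [List.nodup_append]
        refine ⟨h, List.nodup_singleton c, ?_⟩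
        intro a ha b hb heq
        rw [List.mem_singleton] at hb
        subst hb; subst heq
        exact hc ha
      obtain ⟨h1, h2⟩ := ih (acc ++ [c]) hnd
      refine ⟨h1, fun x => ?_⟩
      rw [h2]
      simp only [List.mem_append, List.mem_cons]
      tauto

-- B's loop counts: running count plus the "prev"-aware tally of the rest
def pvCount (prev : Option Char) : List Char → Nat
  | [] => 0
  | c :: t => (if prev = some c then 0 else 1) + pvCount (some c) t

theorem pvB_fold (l : List Char) : ∀ st : Nat × Option Char,
    (l.foldl (fun (st : Nat × Option Char) c =>
      (if st.2 = some c then st.1 else st.1 + 1, some c)) st).1 = st.1 + pvCount st.2 l := by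
  induction l with
  | nil => intro st; simp [pvCount]
  | cons c t ih =>
    intro st
    simp only [List.foldl_cons, pvCount, ih]
    split_ifs <;> omega

-- on a sorted list, the adjacent tally with lower bound c counts the distinct elements ≠ c
theorem pvCount_sorted (l : List Char) : ∀ c : Char, l.Pairwise (· ≤ ·) →
    (∀ x ∈ l, c ≤ x) → pvCount (some c) l = (l.toFinset.erase c).card := by
  induction l with
  | nil => intro c _ _; simp [pvCount]
  | cons d t ih =>
    intro c hp hle
    have hdt : ∀ x ∈ t, d ≤ x := fun x hx => (List.pairwise_cons.mp hp).1 x hx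
    have ht : t.Pairwise (· ≤ ·) := (List.pairwise_cons.mp hp).2
    have ihd := ih d ht hdt
    simp only [pvCount, ihd, List.toFinset_cons]
    by_cases hcd : c = d
    · subst hcd
      simp [Finset.erase_insert_eq_erase]
    · have h1 : (if some c = some d then 0 else 1) = 1 := by simp [hcd]
      rw [h1]
      have hcd' : c < d := lt_of_le_of_ne (hle d (by simp)) hcd
      have hct : c ∉ t.toFinset := by
        simp only [List.mem_toFinset]
        intro hmem
        exact absurd (hdt c hmem) (not_le.mpr hcd')
      have hcid : c ∉ insert d t.toFinset := by
        simp [hct, hcd]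
      rw [Finset.erase_eq_of_notMem hcid]
      have hins : insert d t.toFinset = insert d (t.toFinset.erase d) := by
        ext x
        simp only [Finset.mem_insert, Finset.mem_erase]
        constructor
        · rintro (hx | hx)
          · exact Or.inl hx
          · by_cases hxd : x = d
            · exact Or.inl hxd
            · exact Or.inr ⟨hxd, hx⟩
        · rintro (hx | ⟨_, hx⟩)
          · exact Or.inl hx
          · exact Or.inr hx
      rw [hins, Finset.card_insert_of_notMem (Finset.notMem_erase d _)]
      omega

theorem pvCount_sorted_top (l : List Char) (hp : l.Pairwise (· ≤ ·)) :
    pvCount none l = l.toFinset.card := by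
  cases l with
  | nil => simp [pvCount]
  | cons c t =>
    have hct : ∀ x ∈ t, c ≤ x := fun x hx => (List.pairwise_cons.mp hp).1 x hx
    have ht : t.Pairwise (· ≤ ·) := (List.pairwise_cons.mp hp).2
    simp only [pvCount, pvCount_sorted t c ht hct, List.toFinset_cons]
    rw [if_neg (by simp : ¬ ((none : Option Char) = some c))]
    have hins : insert c t.toFinset = insert c (t.toFinset.erase c) := by
      ext x
      simp only [Finset.mem_insert, Finset.mem_erase]
      constructor
      · rintro (hx | hx)
        · exact Or.inl hx
        · by_cases hxc : x = c
          · exact Or.inl hxc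
          · exact Or.inr ⟨hxc, hx⟩
      · rintro (hx | ⟨_, hx⟩)
        · exact Or.inl hx
        · exact Or.inr hx
    rw [hins, Finset.card_insert_of_notMem (Finset.notMem_erase c _)]
    omega

-- ===== VERDICT (by name: the statement is the Claim_ definition above) =====
theorem f_spec : Claim_equal_f := by
  intro password _
  unfold Spec_f f f_alt
  simp only []
  set l := password.toList with hl
  -- A side: length of the accumulated nodup list = card of the char set
  obtain ⟨hnd, hmem⟩ := pvA_inv l [] (by simp)
  set R := l.foldl (fun acc letter => if letter ∈ acc then acc else acc ++ [letter]) [] with hR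
  have hRfin : R.toFinset = l.toFinset := by
    ext x
    simp only [List.mem_toFinset]
    rw [hmem x]
    simp
  have hAlen : R.length = l.toFinset.card := by
    rw [← hRfin, List.toFinset_card_of_nodup hnd]
  -- B side
  set s := PySem.List.sorted l (fun x => x) false with hs
  have hperm : s.Perm l := PySem.List.sorted_perm l (fun x => x) false
  have hsp : s.Pairwise (fun a b => a ≤ b) := PySem.List.sorted_pairwise l (fun x => x)
  have hBfold := pvB_fold s (0, none)
  have hBcount : pvCount none s = l.toFinset.card := by
    have hfin : s.toFinset = l.toFinset := by
      ext x
      simp only [List.mem_toFinset]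
      exact hperm.mem_iff
    rw [pvCount_sorted_top s hsp, hfin]
  rw [hBfold] at *
  simp only [Nat.zero_add] at *
  rw [hBcount, hAlen]
  by_cases h6 : l.toFinset.card ≥ 6 <;> simp [h6]
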